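-- pv_equiv track=rewrite | github.com/AbdelkaderMkd/Bio-inspired_Algorithms | Cuckoo.py | reproDuctionChild1TwoPoints
-- ===== SOURCE A (Python) =====
-- def reproDuctionChild1TwoPoints(cromoA, cromoB, rand, where1,where2):
--     res  = [0]*256
--
--     if rand == 0:
--
--         for i in range(len(res)):
--
--             if i <= where1  or i > where2:
--                 res[i] = cromoA[i]
--             else:
--                 res[i] = cromoB[i]
--
--     return res
-- ===== SOURCE B (Python) =====
-- def reproDuctionChild1TwoPoints(cromoA, cromoB, rand, where1, where2):
--     if rand != 0:
--         return [0] * 256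
--     lo = min(max(where1 + 1, 0), 256)
--     hi = min(max(where2 + 1, 0), 256)
--     if hi < lo:
--         hi = lo
--     return cromoA[:lo] + cromoB[lo:hi] + cromoA[hi:256]
-- ===== Notes on version B (the rewrite author's own statement) =====
-- stated objective: idiomatic
-- what changed: Replaces the 256-step conditional index loop with clamped crossover bounds and a three-slice concatenation cromoA[:lo] + cromoB[lo:hi] + cromoA[hi:256].
import Mathlib
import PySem

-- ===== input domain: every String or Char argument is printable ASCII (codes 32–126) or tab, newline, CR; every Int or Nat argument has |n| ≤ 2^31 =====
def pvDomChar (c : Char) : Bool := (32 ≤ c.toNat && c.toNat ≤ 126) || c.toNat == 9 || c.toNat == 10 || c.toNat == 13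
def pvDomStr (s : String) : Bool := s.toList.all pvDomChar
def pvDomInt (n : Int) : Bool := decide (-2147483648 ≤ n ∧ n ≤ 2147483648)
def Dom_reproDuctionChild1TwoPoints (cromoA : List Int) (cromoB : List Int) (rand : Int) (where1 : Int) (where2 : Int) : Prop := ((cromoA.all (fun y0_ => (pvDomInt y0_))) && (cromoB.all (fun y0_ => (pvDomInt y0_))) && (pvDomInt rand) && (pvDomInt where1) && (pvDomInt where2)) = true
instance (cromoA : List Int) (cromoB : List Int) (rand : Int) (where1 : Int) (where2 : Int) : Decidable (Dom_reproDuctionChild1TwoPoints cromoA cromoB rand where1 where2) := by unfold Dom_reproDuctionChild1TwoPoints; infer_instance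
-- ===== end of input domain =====

-- B replaces A's 256-step conditional index loop by clamped crossover bounds and a
-- three-slice concatenation cromoA[:lo] ++ cromoB[lo:hi] ++ cromoA[hi:256] (idiomatic).

-- ===== PORT A =====
-- literal port of A; pyGetD's default 0 is only reached where the Python raises
-- IndexError, and Pre_ excludes exactly those inputs.
def reproDuctionChild1TwoPoints (cromoA : List Int) (cromoB : List Int) (rand : Int) (where1 : Int) (where2 : Int) : List Int :=
  let res : List Int := List.replicate 256 0
  if rand = 0 then
    (List.range res.length).foldl
      (fun acc (i : ℕ) =>
        if (i : Int) ≤ where1 ∨ where2 < (i : Int) then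
          acc.set i (PySem.List.pyGetD cromoA (i : Int) 0)
        else
          acc.set i (PySem.List.pyGetD cromoB (i : Int) 0))
      res
  else
    res

-- ===== PORT B =====
def reproDuctionChild1TwoPoints_alt (cromoA : List Int) (cromoB : List Int) (rand : Int) (where1 : Int) (where2 : Int) : List Int :=
  if rand ≠ 0 then
    List.replicate 256 0
  else
    let lo : Int := min (max (where1 + 1) 0) 256
    let hi0 : Int := min (max (where2 + 1) 0) 256
    let hi : Int := if hi0 < lo then lo else hi0
    PySem.List.slice cromoA none (some lo) ++ PySem.List.slice cromoB (some lo) (some hi) ++ PySem.List.slice cromoA (some hi) (some 256)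

-- ===== PRECONDITION & SPEC =====
-- Pre_ is exactly the set of inputs on which A returns: when rand == 0 every index
-- 0 ≤ i < 256 must be in range for the chromosome A reads it from (else IndexError).
def Pre_reproDuctionChild1TwoPoints (cromoA : List Int) (cromoB : List Int) (rand : Int) (where1 : Int) (where2 : Int) : Prop :=
  rand = 0 → ∀ i : ℕ, i < 256 →
    (((i : Int) ≤ where1 ∨ where2 < (i : Int)) → i < cromoA.length) ∧
    (¬((i : Int) ≤ where1 ∨ where2 < (i : Int)) → i < cromoB.length)
instance (cromoA : List Int) (cromoB : List Int) (rand : Int) (where1 : Int) (where2 : Int) : Decidable (Pre_reproDuctionChild1TwoPoints cromoA cromoB rand where1 where2) := by unfold Pre_reproDuctionChild1TwoPoints; infer_instance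

def pvWitness_reproDuctionChild1TwoPoints : List Int × List Int × Int × Int × Int := ([], [], 1, 0, 0)

def Spec_reproDuctionChild1TwoPoints (cromoA : List Int) (cromoB : List Int) (rand : Int) (where1 : Int) (where2 : Int) (out : List Int) : Prop := out = reproDuctionChild1TwoPoints_alt cromoA cromoB rand where1 where2
instance (cromoA : List Int) (cromoB : List Int) (rand : Int) (where1 : Int) (where2 : Int) (out : List Int) : Decidable (Spec_reproDuctionChild1TwoPoints cromoA cromoB rand where1 where2 out) := by unfold Spec_reproDuctionChild1TwoPoints; infer_instance

-- ===== CLAIM (what is proved, stated in full; the proofs are below) =====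
def Claim_equal_reproDuctionChild1TwoPoints : Prop := ∀ (cromoA : List Int) (cromoB : List Int) (rand : Int) (where1 : Int) (where2 : Int), Dom_reproDuctionChild1TwoPoints cromoA cromoB rand where1 where2 → Pre_reproDuctionChild1TwoPoints cromoA cromoB rand where1 where2 → Spec_reproDuctionChild1TwoPoints cromoA cromoB rand where1 where2 (reproDuctionChild1TwoPoints cromoA cromoB rand where1 where2)

-- ===== LEMMAS AND PROOFS =====

-- the index-assignment loop writes f i at every position i < n
lemma setLoop_eq (f : ℕ → Int) (n : ℕ) (init : List Int) (h : n ≤ init.length) :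
    (List.range n).foldl (fun acc i => acc.set i (f i)) init
      = (List.range n).map f ++ init.drop n := by
  induction n with
  | zero => simp
  | succ n ih =>
    have hn : n < init.length := by omega
    rw [List.range_succ, List.foldl_append, ih (by omega), List.foldl_cons, List.foldl_nil,
      List.set_append]
    simp only [List.length_map, List.length_range, lt_irrefl, if_false, Nat.sub_self]
    rw [List.drop_eq_getElem_cons hn, List.set_cons_zero, List.map_append]
    simp

lemma map_getD_range' (l : List Int) (d : Int) (a n : ℕ) (h : a + n ≤ l.length) :
    (List.range' a n).map (fun i => l.getD i d) = (l.drop a).take n := by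
  induction n generalizing a with
  | zero => simp
  | succ n ih =>
    have ha : a < l.length := by omega
    rw [List.range'_succ, List.map_cons, List.drop_eq_getElem_cons ha, List.take_succ_cons,
      ih (a + 1) (by omega), List.getD_eq_getElem l d ha]

lemma range_split (a b : ℕ) (h1 : a ≤ b) (h2 : b ≤ 256) :
    List.range 256 = List.range' 0 a ++ List.range' a (b - a) ++ List.range' b (256 - b) := by
  rw [List.range_eq_range']
  have e1 : List.range' 0 a ++ List.range' a (b - a) = List.range' 0 b := by
    have h := List.range'_append_1 (s := 0) (m := a) (n := b - a)
    simp only [Nat.zero_add] at h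
    rwa [Nat.add_sub_cancel' h1] at h
  have e2 : List.range' 0 b ++ List.range' b (256 - b) = List.range' 0 256 := by
    have h := List.range'_append_1 (s := 0) (m := b) (n := 256 - b)
    simp only [Nat.zero_add] at h
    rwa [Nat.add_sub_cancel' h2] at h
  rw [← e2, ← e1]

-- the heart: under Pre_'s in-range condition the loop result is the slice concatenation
lemma key (cromoA cromoB : List Int) (where1 where2 lo hi : Int)
    (hlo : lo = min (max (where1 + 1) 0) 256)
    (hhi : hi = if min (max (where2 + 1) 0) 256 < lo then lo else min (max (where2 + 1) 0) 256)
    (H : ∀ i : ℕ, i < 256 →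
      (((i : Int) ≤ where1 ∨ where2 < (i : Int)) → i < cromoA.length) ∧
      (¬((i : Int) ≤ where1 ∨ where2 < (i : Int)) → i < cromoB.length)) :
    (List.range 256).foldl
      (fun acc (i : ℕ) =>
        if (i : Int) ≤ where1 ∨ where2 < (i : Int) then
          acc.set i (PySem.List.pyGetD cromoA (i : Int) 0)
        else
          acc.set i (PySem.List.pyGetD cromoB (i : Int) 0))
      (List.replicate 256 0)
      = PySem.List.slice cromoA none (some lo) ++ PySem.List.slice cromoB (some lo) (some hi)
          ++ PySem.List.slice cromoA (some hi) (some 256) := by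
  have h0lo : 0 ≤ lo := by omega
  have h0hi : lo ≤ hi := by omega
  have hhi256 : hi ≤ 256 := by omega
  set la := lo.toNat with hla
  set lb := hi.toNat with hlb
  have hab : la ≤ lb := by omega
  have hb256 : lb ≤ 256 := by omega
  -- lengths supplied by Pre_
  have hAlo : la ≤ cromoA.length := by
    rcases Nat.eq_zero_or_pos la with h | h
    · omega
    · have := (H (la - 1) (by omega)).1 (Or.inl (by omega))
      omega
  have hBhi : la < lb → lb ≤ cromoB.length := by
    intro hlt
    have := (H (lb - 1) (by omega)).2 (by rw [not_or]; constructor <;> omega)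
    omega
  have hA256 : lb < 256 → 256 ≤ cromoA.length := by
    intro hlt
    have := (H 255 (by omega)).1 (Or.inr (by omega))
    omega
  -- loop body as a single set
  have hfun : (fun (acc : List Int) (i : ℕ) =>
        if (i : Int) ≤ where1 ∨ where2 < (i : Int) then
          acc.set i (PySem.List.pyGetD cromoA (i : Int) 0)
        else
          acc.set i (PySem.List.pyGetD cromoB (i : Int) 0))
      = fun acc i => acc.set i
          (if (i : Int) ≤ where1 ∨ where2 < (i : Int) then
            PySem.List.pyGetD cromoA (i : Int) 0 else PySem.List.pyGetD cromoB (i : Int) 0) := by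
    funext acc i
    split <;> rfl
  rw [hfun, setLoop_eq _ 256 _ (le_of_eq (List.length_replicate).symm),
    List.drop_eq_nil_of_le (le_of_eq List.length_replicate), List.append_nil]
  -- split the index range at la and lb
  rw [range_split la lb hab hb256, List.map_append, List.map_append]
  -- slices as take/drop
  rw [PySem.List.slice_to cromoA h0lo,
      PySem.List.slice_toNat cromoB h0lo (by omega),
      PySem.List.slice_toNat cromoA (by omega) (by norm_num)]
  have h256 : (256 : Int).toNat = 256 := rfl
  -- segment 1 : indices < la read cromoA
  have seg1 : (List.range' 0 la).map
      (fun (i : ℕ) => if (i : Int) ≤ where1 ∨ where2 < (i : Int) then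
        PySem.List.pyGetD cromoA (i : Int) 0 else PySem.List.pyGetD cromoB (i : Int) 0)
      = cromoA.take la := by
    rw [List.map_congr_left (g := fun i => cromoA.getD i 0)]
    · rw [map_getD_range' cromoA 0 0 la (by omega)]
      simp
    · intro i hi
      have hib : i < la := by
        obtain ⟨k, hk, rfl⟩ := List.mem_range'.mp hi
        omega
      rw [if_pos (Or.inl (by omega)), PySem.List.pyGetD_natCast]
  -- segment 2 : la ≤ i < lb read cromoB
  have seg2 : (List.range' la (lb - la)).map
      (fun (i : ℕ) => if (i : Int) ≤ where1 ∨ where2 < (i : Int) then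
        PySem.List.pyGetD cromoA (i : Int) 0 else PySem.List.pyGetD cromoB (i : Int) 0)
      = (cromoB.drop la).take (lb - la) := by
    rcases Nat.eq_or_lt_of_le hab with h | h
    · rw [← h]; simp
    · rw [List.map_congr_left (g := fun i => cromoB.getD i 0)]
      · exact map_getD_range' cromoB 0 la (lb - la) (by have := hBhi h; omega)
      · intro i hi
        have hib : la ≤ i ∧ i < lb := by
          obtain ⟨k, hk, rfl⟩ := List.mem_range'.mp hi
          omega
        rw [if_neg (by rw [not_or]; constructor <;> omega), PySem.List.pyGetD_natCast]
  -- segment 3 : lb ≤ i < 256 read cromoA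
  have seg3 : (List.range' lb (256 - lb)).map
      (fun (i : ℕ) => if (i : Int) ≤ where1 ∨ where2 < (i : Int) then
        PySem.List.pyGetD cromoA (i : Int) 0 else PySem.List.pyGetD cromoB (i : Int) 0)
      = (cromoA.drop lb).take (256 - lb) := by
    rcases Nat.eq_or_lt_of_le hb256 with h | h
    · rw [h]; simp
    · rw [List.map_congr_left (g := fun i => cromoA.getD i 0)]
      · exact map_getD_range' cromoA 0 lb (256 - lb) (by have := hA256 h; omega)
      · intro i hi
        have hib : lb ≤ i ∧ i < 256 := by
          obtain ⟨k, hk, rfl⟩ := List.mem_range'.mp hi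
          omega
        rw [if_pos (Or.inr (by omega)), PySem.List.pyGetD_natCast]
  rw [seg1, seg2, seg3, h256]

-- ===== VERDICT (by name: the statement is the Claim_ definition above) =====
theorem reproDuctionChild1TwoPoints_spec : Claim_equal_reproDuctionChild1TwoPoints := by
  intro cromoA cromoB rand where1 where2 _ hpre
  unfold Spec_reproDuctionChild1TwoPoints reproDuctionChild1TwoPoints reproDuctionChild1TwoPoints_alt
  by_cases hr : rand = 0
  · simp only [hr, ite_not, List.length_replicate]
    exact key cromoA cromoB where1 where2 _ _ rfl rfl (hpre hr)
  · simp [hr]
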